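-- pv_equiv track=rewrite | github.com/zgsm-ai/zgsm-backend-deploy | fauxpilot/common.py | is_repetitive_content
-- ===== SOURCE A (Python) =====
-- STR_PREFIX_CONFIG = [
--     {
--         "maxTokenSequenceLength": 1,
--         "lastTokensToConsider": 10,
--     },
--     {
--         "maxTokenSequenceLength": 10,
--         "lastTokensToConsider": 30,
--     },
--     {
--         "maxTokenSequenceLength": 20,
--         "lastTokensToConsider": 45,
--     },
--     {
--         "maxTokenSequenceLength": 30,
--         "lastTokensToConsider": 60,
--     },
-- ]
--
-- def compute_prefix_suffix_match_length(content):
--     """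
--     Calculate the longest prefix suffix matching length of the string
--     :param content: string
--     :return: Matching length array
--     """
--     match_lengths = [0 for _ in range(len(content))]
--     match_lengths[0] = -1
--     match_index = -1
--     for i in range(1, len(content)):
--         while match_index >= 0 and content[match_index + 1] != content[i]:
--             match_index = match_lengths[match_index]
--         if content[match_index + 1] == content[i]:
--             match_index += 1
--         match_lengths[i] = match_index
--     return match_lengths
--
-- def is_repetitive_content(content):
--     match_lengths = compute_prefix_suffix_match_length(content)
--     for config in STR_PREFIX_CONFIG:
--         # Consider the number of duplicate characters in the prefix and suffix of the string composed of the last lastTokensToConsider characters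
--         max_match = max(match_lengths[:config["lastTokensToConsider"]])
--         if (
--             len(content) >= config["lastTokensToConsider"]
--             and config["lastTokensToConsider"] - 1 - max_match <= config["maxTokenSequenceLength"]
--         ):
--             return True
--     return False
-- ===== SOURCE B (Python) =====
-- STR_PREFIX_CONFIG = [
--     {"maxTokenSequenceLength": 1, "lastTokensToConsider": 10},
--     {"maxTokenSequenceLength": 10, "lastTokensToConsider": 30},
--     {"maxTokenSequenceLength": 20, "lastTokensToConsider": 45},
--     {"maxTokenSequenceLength": 30, "lastTokensToConsider": 60},
-- ]
--
-- def is_repetitive_content(content):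
--     n = len(content)
--     # Only match_lengths[:60] is ever inspected, and entry i depends only on content[:i+1],
--     # so it suffices to compute borders of prefixes of content[:60] -- O(1) in len(content).
--     head = content[:60]
--     # match_lengths[i] = (length of the longest proper border of head[:i+1]) - 1,
--     # computed by direct prefix/suffix comparison instead of KMP failure links.
--     match_lengths = []
--     for i in range(len(head)):
--         b = 0
--         for L in range(1, i + 1):
--             if head[:L] == head[i + 1 - L:i + 1]:
--                 b = L
--         match_lengths.append(b - 1)
--     for config in STR_PREFIX_CONFIG:
--         ltc = config["lastTokensToConsider"]
--         if n >= ltc and ltc - 1 - max(match_lengths[:ltc]) <= config["maxTokenSequenceLength"]: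
--             return True
--     return False
-- ===== Notes on version B (the rewrite author's own statement) =====
-- stated objective: faster
-- what changed: B computes the border table only for content[:60] (the only entries A's config checks ever read), by naive direct prefix/suffix comparison instead of A's KMP failure-link loop over the whole string.
import Mathlib
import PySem

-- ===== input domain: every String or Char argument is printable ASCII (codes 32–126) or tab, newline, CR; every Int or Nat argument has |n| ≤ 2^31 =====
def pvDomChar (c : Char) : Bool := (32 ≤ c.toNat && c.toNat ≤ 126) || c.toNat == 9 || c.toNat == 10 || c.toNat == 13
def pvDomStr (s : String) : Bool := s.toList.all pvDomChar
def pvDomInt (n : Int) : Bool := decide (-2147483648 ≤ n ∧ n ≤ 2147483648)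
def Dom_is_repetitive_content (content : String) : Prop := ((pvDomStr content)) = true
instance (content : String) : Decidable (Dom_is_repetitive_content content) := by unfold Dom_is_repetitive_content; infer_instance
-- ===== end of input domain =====

-- B observes that only the first 60 border-table entries are ever inspected, so it
-- computes borders of content[:60] only, by naive direct prefix/suffix comparison
-- instead of KMP failure links (O(1) in the string length vs A's O(n)); the empty
-- string, on which A raises IndexError, is excluded by Pre_.

-- ===== PORT A =====
-- the KMP inner while loop:
-- 'while match_index >= 0 and content[match_index+1] != content[i]: match_index = match_lengths[match_index]'
-- (the fuel only makes the recursion structural; it provably suffices on every run the port performs)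
def pvLoopA (cs : List Char) (oci : Option Char) (ml : List Int) : Nat → Int → Int
  | 0, mi => mi
  | fuel + 1, mi =>
    if 0 ≤ mi ∧ PySem.List.pyGet? cs (mi + 1) ≠ oci then
      pvLoopA cs oci ml fuel (PySem.List.pyGetD ml mi 0)
    else mi

-- the body of 'for i in range(1, len(content))' in compute_prefix_suffix_match_length,
-- carrying (match_lengths so far, match_index)
def pvStepA (cs : List Char) (st : List Int × Int) (i : Int) : List Int × Int :=
  let oci := PySem.List.pyGet? cs i
  let mi := pvLoopA cs oci st.1 (st.2.toNat + 1) st.2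
  let mi := if PySem.List.pyGet? cs (mi + 1) = oci then mi + 1 else mi
  (st.1 ++ [mi], mi)

-- compute_prefix_suffix_match_length (entries are produced in index order, starting from [-1])
def pvComputeML (cs : List Char) : List Int :=
  ((PySem.List.pyRange 1 (cs.length : Int) 1).foldl (pvStepA cs) ([-1], -1)).1

-- STR_PREFIX_CONFIG as (maxTokenSequenceLength, lastTokensToConsider) pairs
def pvConfigs : List (Int × Int) := [(1, 10), (10, 30), (20, 45), (30, 60)]

def is_repetitive_content (content : String) : Bool :=
  let cs := content.toList
  let ml := pvComputeML cs
  pvConfigs.any fun cfg =>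
    let maxm := (PySem.List.max? (PySem.List.slice ml none (some cfg.2)) (fun x => x)).getD 0
    decide ((cs.length : Int) ≥ cfg.2) && decide (cfg.2 - 1 - maxm ≤ cfg.1)

-- ===== PORT B =====
-- naive longest proper border of content[:i+1]:
-- b = max { L in [1,i] | content[:L] == content[i+1-L:i+1] } (0 if none)
def pvNaiveBorder (cs : List Char) (i : Nat) : Int :=
  (PySem.List.pyRange 1 ((i : Int) + 1) 1).foldl
    (fun b L =>
      if PySem.List.slice cs none (some L) = PySem.List.slice cs (some ((i : Int) + 1 - L)) (some ((i : Int) + 1)) then L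
      else b)
    0

def is_repetitive_content_alt (content : String) : Bool :=
  let cs := content.toList
  let head := PySem.List.slice cs none (some 60)
  let ml := (List.range head.length).map (fun i => pvNaiveBorder head i - 1)
  pvConfigs.any fun cfg =>
    let maxm := (PySem.List.max? (PySem.List.slice ml none (some cfg.2)) (fun x => x)).getD 0
    decide ((cs.length : Int) ≥ cfg.2) && decide (cfg.2 - 1 - maxm ≤ cfg.1)

-- ===== PRECONDITION & SPEC =====
-- Pre_ excludes only the empty string, on which A raises IndexError (it writes match_lengths[0] into an empty list).
def Pre_is_repetitive_content (content : String) : Prop := content ≠ ""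
instance (content : String) : Decidable (Pre_is_repetitive_content content) := by unfold Pre_is_repetitive_content; infer_instance

def pvWitness_is_repetitive_content : String := "ab"

def Spec_is_repetitive_content (content : String) (out : Bool) : Prop := out = is_repetitive_content_alt content
instance (content : String) (out : Bool) : Decidable (Spec_is_repetitive_content content out) := by unfold Spec_is_repetitive_content; infer_instance

-- ===== CLAIM (what is proved, stated in full; the proofs are below) =====
def Claim_equal_is_repetitive_content : Prop := ∀ (content : String), Dom_is_repetitive_content content → Pre_is_repetitive_content content → Spec_is_repetitive_content content (is_repetitive_content content)

-- ===== LEMMAS AND PROOFS =====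

-- 'L is a proper border of cs.take i'
def brdB (cs : List Char) (i L : Nat) : Bool := decide (L < i ∧ cs.take L <:+ cs.take i)

-- length of the longest proper border of cs.take i (0 if none)
def brd (cs : List Char) (i : Nat) : Nat := Nat.findGreatest (fun L => brdB cs i L = true) (i - 1)

lemma brdB_iff (cs : List Char) (i L : Nat) :
    brdB cs i L = true ↔ L < i ∧ cs.take L <:+ cs.take i := by
  simp [brdB]

lemma brd_le (cs : List Char) (i : Nat) : brd cs i ≤ i - 1 := Nat.findGreatest_le _

lemma brd_lt (cs : List Char) {i : Nat} (hi : 0 < i) : brd cs i < i :=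
  lt_of_le_of_lt (brd_le cs i) (by omega)

lemma brdB_zero (cs : List Char) {i : Nat} (hi : 0 < i) : brdB cs i 0 = true := by
  rw [brdB_iff]; exact ⟨hi, by simp⟩

lemma brd_isBorder (cs : List Char) {i : Nat} (hi : 0 < i) : brdB cs i (brd cs i) = true := by
  unfold brd
  exact Nat.findGreatest_spec (P := fun L => brdB cs i L = true) (n := i - 1) (Nat.zero_le _) (brdB_zero cs hi)

lemma le_brd (cs : List Char) {i L : Nat} (h : brdB cs i L = true) : L ≤ brd cs i := by
  have hL : L < i := ((brdB_iff cs i L).1 h).1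
  exact Nat.le_findGreatest (by omega) h

lemma border_trans (cs : List Char) {i k c : Nat} (h1 : brdB cs i k = true)
    (h2 : brdB cs i c = true) (hkc : k < c) : brdB cs c k = true := by
  rw [brdB_iff] at h1 h2 ⊢
  refine ⟨hkc, List.suffix_of_suffix_length_le h1.2 h2.2 ?_⟩
  simp only [List.length_take]
  omega

lemma border_of_border (cs : List Char) {i c k : Nat} (h1 : brdB cs c k = true)
    (h2 : brdB cs i c = true) : brdB cs i k = true := by
  rw [brdB_iff] at h1 h2 ⊢
  exact ⟨lt_trans h1.1 h2.1, h1.2.trans h2.2⟩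

lemma concat_suffix_concat {α : Type} (a b : List α) (x y : α) :
    a ++ [x] <:+ b ++ [y] ↔ x = y ∧ a <:+ b := by
  rw [← List.reverse_prefix]
  simp only [List.reverse_append, List.reverse_singleton, List.singleton_append,
    List.cons_prefix_cons, List.reverse_prefix]

lemma take_eq_of_suffix (cs : List Char) {m j : Nat} (hm : m ≤ j) (hj : j ≤ cs.length) :
    cs.take m <:+ cs.take j ↔ cs.take m = (cs.take j).drop (j - m) := by
  constructor
  · intro h
    obtain ⟨p, hp⟩ := h
    have hlen : p.length = j - m := by
      have := congrArg List.length hp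
      simp only [List.length_append, List.length_take] at this
      omega
    rw [← hlen, ← hp, List.drop_left]
  · intro h
    rw [h]
    exact List.drop_suffix _ _

lemma ext_iff (cs : List Char) {i : Nat} (hin : i < cs.length) (L : Nat) :
    brdB cs (i + 1) (L + 1) = true ↔ (brdB cs i L = true ∧ cs[L]? = cs[i]?) := by
  rw [brdB_iff, brdB_iff]
  constructor
  · rintro ⟨h1, h2⟩
    have hL : L < i := by omega
    have hLlen : L < cs.length := by omega
    rw [List.take_add_one, List.take_add_one, List.getElem?_eq_getElem hLlen,
      List.getElem?_eq_getElem hin] at h2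
    simp only [Option.toList_some] at h2
    rw [concat_suffix_concat] at h2
    refine ⟨⟨hL, h2.2⟩, ?_⟩
    rw [List.getElem?_eq_getElem hLlen, List.getElem?_eq_getElem hin, h2.1]
  · rintro ⟨⟨hL, hs⟩, he⟩
    have hLlen : L < cs.length := by omega
    rw [List.getElem?_eq_getElem hLlen, List.getElem?_eq_getElem hin] at he
    have he' : cs[L] = cs[i] := by injection he
    refine ⟨by omega, ?_⟩
    rw [List.take_add_one, List.take_add_one, List.getElem?_eq_getElem hLlen,
      List.getElem?_eq_getElem hin]
    simp only [Option.toList_some]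
    rw [concat_suffix_concat]
    exact ⟨he', hs⟩

-- the failure-link chain descent with its stopping condition
def extLoop (cs : List Char) (oci : Option Char) (c : Nat) : Int :=
  if h : c ≠ 0 ∧ cs[c]? ≠ oci then extLoop cs oci (brd cs c)
  else (c : Int) - 1
termination_by c
decreasing_by exact brd_lt cs (by omega)

lemma extLoop_spec (cs : List Char) {i : Nat} (hi : 0 < i) (hin : i < cs.length) :
    ∀ c : Nat, brdB cs i c = true →
      ∃ c' : Nat, extLoop cs cs[i]? c = (c' : Int) - 1 ∧ c' ≤ c ∧ brdB cs i c' = true ∧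
        (c' = 0 ∨ cs[c']? = cs[i]?) ∧
        (∀ k, brdB cs i k = true → cs[k]? = cs[i]? → k ≤ c → k ≤ c') := by
  intro c
  induction c using Nat.strong_induction_on with
  | _ c IH =>
    intro hc
    rw [extLoop]
    by_cases h : c ≠ 0 ∧ cs[c]? ≠ cs[i]?
    · rw [dif_pos h]
      have hc0 : 0 < c := Nat.pos_of_ne_zero h.1
      have hb : brdB cs i (brd cs c) = true :=
        border_of_border cs (brd_isBorder cs hc0) hc
      obtain ⟨c', e, hle, hb', hstop, hmax⟩ := IH (brd cs c) (brd_lt cs hc0) hb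
      refine ⟨c', e, le_trans hle (le_of_lt (brd_lt cs hc0)), hb', hstop, ?_⟩
      intro k hk hke hkc
      have hkc' : k < c := lt_of_le_of_ne hkc (by rintro rfl; exact h.2 hke)
      exact hmax k hk hke (le_brd cs (border_trans cs hk hc hkc'))
    · rw [dif_neg h]
      refine ⟨c, rfl, le_refl c, hc, ?_, fun k _ _ hk => hk⟩
      by_cases h0 : c = 0
      · exact Or.inl h0
      · right; by_contra hne; exact h ⟨h0, hne⟩

lemma loopA_eq_extLoop (cs : List Char) {i : Nat} (hi : 0 < i) (hin : i < cs.length)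
    (ml : List Int) (Hml : ∀ j, j < i → ml[j]? = some ((brd cs (j + 1) : Int) - 1)) :
    ∀ c fuel : Nat, c ≤ fuel → brdB cs i c = true →
      pvLoopA cs cs[i]? ml fuel ((c : Int) - 1) = extLoop cs cs[i]? c := by
  intro c
  induction c using Nat.strong_induction_on with
  | _ c IH =>
    intro fuel hf hc
    rw [extLoop]
    by_cases h : c ≠ 0 ∧ cs[c]? ≠ cs[i]?
    · rw [dif_pos h]
      have hc0 : 0 < c := Nat.pos_of_ne_zero h.1
      have hci : c < i := ((brdB_iff cs i c).1 hc).1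
      cases fuel with
      | zero => omega
      | succ f =>
        simp only [pvLoopA]
        have e1 : (c : Int) - 1 + 1 = ((c : Nat) : Int) := by ring
        rw [if_pos]
        · have e2 : PySem.List.pyGetD ml ((c : Int) - 1) 0 = (brd cs c : Int) - 1 := by
            have e3 : ((c : Int) - 1) = ((c - 1 : Nat) : Int) := by omega
            rw [e3, PySem.List.pyGetD_natCast, List.getD_eq_getElem?_getD,
              Hml (c - 1) (by omega)]
            have e4 : c - 1 + 1 = c := by omega
            rw [e4]
            rfl
          rw [e2]
          have hb : brdB cs i (brd cs c) = true :=
            border_of_border cs (brd_isBorder cs hc0) hc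
          exact IH (brd cs c) (brd_lt cs hc0) f (by have := brd_lt cs hc0; omega) hb
        · constructor
          · omega
          · rw [e1, PySem.List.pyGet?_natCast]
            exact h.2
    · rw [dif_neg h]
      cases fuel with
      | zero => simp [pvLoopA]
      | succ f =>
        simp only [pvLoopA]
        rw [if_neg]
        rintro ⟨ha, hb⟩
        by_cases h0 : c = 0
        · subst h0; simp at ha
        · apply hb
          have e1 : (c : Int) - 1 + 1 = ((c : Nat) : Int) := by ring
          rw [e1, PySem.List.pyGet?_natCast]
          by_contra hne
          exact h ⟨h0, hne⟩

-- one step of A's outer loop computes brd cs (i+1) - 1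
lemma step_lemma (cs : List Char) {i : Nat} (hi : 0 < i) (hin : i < cs.length)
    (ml : List Int) (Hml : ∀ j, j < i → ml[j]? = some ((brd cs (j + 1) : Int) - 1)) :
    (if PySem.List.pyGet? cs
          ((pvLoopA cs cs[i]? ml ((((brd cs i : Int) - 1)).toNat + 1) ((brd cs i : Int) - 1)) + 1) = cs[i]?
     then pvLoopA cs cs[i]? ml ((((brd cs i : Int) - 1)).toNat + 1) ((brd cs i : Int) - 1) + 1
     else pvLoopA cs cs[i]? ml ((((brd cs i : Int) - 1)).toNat + 1) ((brd cs i : Int) - 1))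
      = (brd cs (i + 1) : Int) - 1 := by
  have hb0 : brdB cs i (brd cs i) = true := brd_isBorder cs hi
  have hfuel : brd cs i ≤ (((brd cs i : Int) - 1)).toNat + 1 := by omega
  rw [loopA_eq_extLoop cs hi hin ml Hml (brd cs i) _ hfuel hb0]
  obtain ⟨c', e, hle, hb', hstop, hmax⟩ := extLoop_spec cs hi hin (brd cs i) hb0
  rw [e]
  have e1 : (c' : Int) - 1 + 1 = ((c' : Nat) : Int) := by ring
  rw [e1, PySem.List.pyGet?_natCast]
  by_cases hx : cs[c']? = cs[i]?
  · rw [if_pos hx]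
    have h1 : brdB cs (i + 1) (c' + 1) = true := (ext_iff cs hin c').2 ⟨hb', hx⟩
    have hge : c' + 1 ≤ brd cs (i + 1) := le_brd cs h1
    have hle2 : brd cs (i + 1) ≤ c' + 1 := by
      rcases Nat.eq_zero_or_pos (brd cs (i + 1)) with h0 | hpos
      · omega
      · obtain ⟨k, hk⟩ : ∃ k, brd cs (i + 1) = k + 1 := ⟨brd cs (i + 1) - 1, by omega⟩
        have h2 : brdB cs (i + 1) (k + 1) = true := by rw [← hk]; exact brd_isBorder cs (by omega)
        obtain ⟨hkb, hke⟩ := (ext_iff cs hin k).1 h2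
        have := hmax k hkb hke (le_brd cs hkb)
        omega
    have heq : brd cs (i + 1) = c' + 1 := le_antisymm hle2 hge
    rw [heq]
    push_cast
    ring
  · rw [if_neg hx]
    have hc'0 : c' = 0 := by
      rcases hstop with h | h
      · exact h
      · exact absurd h hx
    have h0 : brd cs (i + 1) = 0 := by
      by_contra hne
      have hpos : 0 < brd cs (i + 1) := Nat.pos_of_ne_zero hne
      obtain ⟨k, hk⟩ : ∃ k, brd cs (i + 1) = k + 1 := ⟨brd cs (i + 1) - 1, by omega⟩
      have h2 : brdB cs (i + 1) (k + 1) = true := by rw [← hk]; exact brd_isBorder cs (by omega)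
      obtain ⟨hkb, hke⟩ := (ext_iff cs hin k).1 h2
      have hk0 : k = 0 := by have := hmax k hkb hke (le_brd cs hkb); omega
      subst hk0
      subst hc'0
      exact hx hke
    rw [h0, hc'0]

lemma brd_one (cs : List Char) : brd cs 1 = 0 := by
  simp [brd, Nat.findGreatest_zero]

lemma fold_inv (cs : List Char) : ∀ k : Nat, k < cs.length →
    (PySem.List.pyRange 1 ((k : Int) + 1) 1).foldl (pvStepA cs) ([-1], -1)
      = ((List.range (k + 1)).map (fun j => (brd cs (j + 1) : Int) - 1), (brd cs (k + 1) : Int) - 1) := by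
  intro k
  induction k with
  | zero =>
    intro _
    rw [PySem.List.pyRange_one_eq_nil (by norm_num)]
    simp [brd_one]
  | succ k IHk =>
    intro hk
    have e0 : (((k : Nat) + 1 : Nat) : Int) + 1 = ((k : Int) + 1) + 1 := by push_cast; ring
    rw [e0, PySem.List.pyRange_one_succ_right (by omega), List.foldl_append,
      IHk (by omega)]
    simp only [List.foldl_cons, List.foldl_nil]
    have Hml : ∀ j, j < k + 1 →
        ((List.range (k + 1)).map (fun j => (brd cs (j + 1) : Int) - 1))[j]?
          = some ((brd cs (j + 1) : Int) - 1) := by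
      intro j hj
      simp [hj]
    have ec : ((k : Int) + 1) = (((k + 1 : Nat)) : Int) := by push_cast; ring
    show pvStepA cs _ ((k : Int) + 1) = _
    rw [ec]
    dsimp only [pvStepA]
    rw [PySem.List.pyGet?_natCast]
    rw [step_lemma cs (by omega) (by omega) _ Hml]
    have er : List.range (k + 1 + 1) = List.range (k + 1) ++ [k + 1] := List.range_succ
    rw [er, List.map_append]
    rfl

lemma computeML_eq (cs : List Char) (h : 0 < cs.length) :
    pvComputeML cs = (List.range cs.length).map (fun j => (brd cs (j + 1) : Int) - 1) := by
  unfold pvComputeML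
  have e1 : (cs.length : Int) = ((cs.length - 1 : Nat) : Int) + 1 := by omega
  have e2 : cs.length - 1 + 1 = cs.length := by omega
  rw [e1, fold_inv cs (cs.length - 1) (by omega), e2]

-- fold of 'if P L then L else b' over range(1, k+1) is the greatest L in [1,k] with P L (0 if none)
lemma fold_max (P : Int → Prop) [inst : DecidablePred P] : ∀ k : Nat,
    (PySem.List.pyRange 1 ((k : Int) + 1) 1).foldl (fun b L => if P L then L else b) 0
      = (Nat.findGreatest (fun L => P ((L : Nat) : Int)) k : Int) := by
  intro k
  induction k with
  | zero =>
    rw [PySem.List.pyRange_one_eq_nil (by norm_num)]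
    simp [Nat.findGreatest_zero]
  | succ k IHk =>
    have e0 : (((k : Nat) + 1 : Nat) : Int) + 1 = ((k : Int) + 1) + 1 := by push_cast; ring
    rw [e0, PySem.List.pyRange_one_succ_right (by omega), List.foldl_append, IHk]
    simp only [List.foldl_cons, List.foldl_nil]
    rw [Nat.findGreatest_succ]
    have ec : ((k : Int) + 1) = (((k + 1 : Nat)) : Int) := by push_cast; ring
    rw [ec]
    split_ifs with h1
    · rfl
    · rfl

lemma findGreatest_congr (P Q : Nat → Prop) [DecidablePred P] [DecidablePred Q] :
    ∀ k : Nat, (∀ m, 1 ≤ m → m ≤ k → (P m ↔ Q m)) →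
      Nat.findGreatest P k = Nat.findGreatest Q k := by
  intro k
  induction k with
  | zero => intro _; simp [Nat.findGreatest_zero]
  | succ k IHk =>
    intro h
    rw [Nat.findGreatest_succ, Nat.findGreatest_succ,
      if_congr (h (k + 1) (by omega) (le_refl _)) rfl
        (IHk (fun m h1 h2 => h m h1 (by omega)))]

lemma slice_eq_iff (cs : List Char) {i m : Nat} (hin : i < cs.length) (h1 : 1 ≤ m) (h2 : m ≤ i) :
    (PySem.List.slice cs none (some ((m : Nat) : Int))
        = PySem.List.slice cs (some ((i : Int) + 1 - ((m : Nat) : Int))) (some ((i : Int) + 1)))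
      ↔ brdB cs (i + 1) m = true := by
  have ea : ((i : Int) + 1 - ((m : Nat) : Int)) = ((i + 1 - m : Nat) : Int) := by omega
  have eb : ((i : Int) + 1) = ((i + 1 : Nat) : Int) := by push_cast; ring
  rw [ea, eb, PySem.List.slice_to_natCast, PySem.List.slice_natCast]
  have ec : (i + 1) - (i + 1 - m) = m := by omega
  rw [ec]
  have ed : (cs.drop (i + 1 - m)).take m = (cs.take (i + 1)).drop (i + 1 - m) := by
    rw [List.drop_take]
    have : (i + 1) - (i + 1 - m) = m := by omega
    rw [this]
  rw [ed, brdB_iff]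
  rw [take_eq_of_suffix cs (by omega) (by omega)]
  constructor
  · intro h; exact ⟨by omega, h⟩
  · intro h; exact h.2

lemma naiveBorder_eq (cs : List Char) {i : Nat} (hin : i < cs.length) :
    pvNaiveBorder cs i = (brd cs (i + 1) : Int) := by
  unfold pvNaiveBorder
  rw [fold_max (fun L => PySem.List.slice cs none (some L)
      = PySem.List.slice cs (some ((i : Int) + 1 - L)) (some ((i : Int) + 1))) i]
  congr 1
  rw [findGreatest_congr _ (fun L => brdB cs (i + 1) L = true) i
    (fun m hm1 hm2 => slice_eq_iff cs hin hm1 hm2)]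
  show _ = Nat.findGreatest _ ((i + 1) - 1)
  norm_num

-- the border table of a prefix agrees with the border table of the whole string
lemma brd_take (cs : List Char) (t j : Nat) (h : j ≤ t) : brd (cs.take t) j = brd cs j := by
  unfold brd
  apply findGreatest_congr
  intro m h1 h2
  have e1 : (cs.take t).take m = cs.take m := by rw [List.take_take]; congr 1; omega
  have e2 : (cs.take t).take j = cs.take j := by rw [List.take_take]; congr 1; omega
  rw [brdB_iff, brdB_iff, e1, e2]

-- a slice of at most the first 60 entries does not see entries beyond index 60
lemma slice_ml_eq (f : Nat → Int) (n : Nat) (t : Int) (h0 : 0 ≤ t) (h : t.toNat ≤ 60) :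
    PySem.List.slice ((List.range n).map f) none (some t)
      = PySem.List.slice ((List.range (min 60 n)).map f) none (some t) := by
  have e1 : ∀ m : Nat, ((List.range m).map f).take t.toNat = (List.range (min t.toNat m)).map f := by
    intro m; rw [← List.map_take, List.take_range]
  rw [PySem.List.slice_to _ h0, PySem.List.slice_to _ h0, e1, e1]
  have e2 : min t.toNat n = min t.toNat (min 60 n) := by omega
  rw [e2]

-- ===== VERDICT (by name: the statement is the Claim_ definition above) =====
theorem is_repetitive_content_spec : Claim_equal_is_repetitive_content := by
  intro content _ hpre
  unfold Spec_is_repetitive_content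
  have hne : content.toList ≠ [] := fun h => hpre (String.toList_eq_nil_iff.mp h)
  have hlen : 0 < content.toList.length := List.length_pos_iff.2 hne
  dsimp only [is_repetitive_content, is_repetitive_content_alt]
  rw [computeML_eq _ hlen]
  have hhead : PySem.List.slice content.toList none (some 60) = content.toList.take 60 := by
    rw [PySem.List.slice_to _ (by norm_num), show (60 : Int).toNat = 60 from rfl]
  rw [hhead]
  have hlh : (content.toList.take 60).length = min 60 content.toList.length := by
    rw [List.length_take]
  rw [hlh]
  have eB : (List.range (min 60 content.toList.length)).map
        (fun i => pvNaiveBorder (content.toList.take 60) i - 1)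
      = (List.range (min 60 content.toList.length)).map
        (fun j => (brd content.toList (j + 1) : Int) - 1) := by
    refine List.map_congr_left (fun i hi => ?_)
    have hi' : i < min 60 content.toList.length := List.mem_range.mp hi
    rw [naiveBorder_eq (content.toList.take 60) (i := i) (by simp only [List.length_take]; omega),
      brd_take content.toList 60 (i + 1) (by omega)]
  rw [eB]
  simp only [pvConfigs, List.any_cons, List.any_nil]
  rw [slice_ml_eq _ _ 10 (by norm_num) (by norm_num),
    slice_ml_eq _ _ 30 (by norm_num) (by norm_num),
    slice_ml_eq _ _ 45 (by norm_num) (by norm_num),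
    slice_ml_eq _ _ 60 (by norm_num) (by norm_num)]
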